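-- pv_equiv track=rewrite | github.com/wtf-sonii/CPS109_labs | labs109.py | bulgarian_solitaire
-- ===== SOURCE A (Python) =====
-- def bulgarian_solitaire(piles, k):
--   flag = True
--   count = 0
--   piles_copy = piles.copy()
--   enum_list = [i for i in range(1, k+1)]
--   while flag==True:
--     for i in enum_list:
--       if i not in piles_copy:
--         count += 1
--         newpile = 0
--         tempPiles = []
--         for pile in piles_copy:
--           adjpile = pile - 1
--           newpile += 1
--           if adjpile > 0:
--             tempPiles.append(adjpile)
--         tempPiles.append(newpile)
--         piles_copy = tempPiles
--         break
--       elif i >= len(enum_list):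
--         flag=False
--   return count
-- ===== SOURCE B (Python) =====
-- def bulgarian_solitaire(piles, k):
--     cnt = {}
--     for p in piles:
--         cnt[p] = cnt.get(p, 0) + 1
--     moves = 0
--     while any(cnt.get(i, 0) == 0 for i in range(1, k + 1)):
--         total = sum(cnt.values())
--         nxt = {}
--         for s, c in cnt.items():
--             if s - 1 > 0:
--                 nxt[s - 1] = c
--         nxt[total] = nxt.get(total, 0) + 1
--         cnt = nxt
--         moves += 1
--     return moves
-- ===== Notes on version B (the rewrite author's own statement) =====
-- stated objective: alternative
-- what changed: B replaces A's list-of-piles state by a size->multiplicity histogram (dict): the end test reads one bucket per size i in 1..k instead of scanning the whole pile list per i, and a move is one pass over the distinct sizes (shift bucket s to s-1 when s-1>0, then bump the bucket for the new pile = number of piles) instead of rebuilding the pile list element by element; B diverges exactly where A diverges.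
import Mathlib
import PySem

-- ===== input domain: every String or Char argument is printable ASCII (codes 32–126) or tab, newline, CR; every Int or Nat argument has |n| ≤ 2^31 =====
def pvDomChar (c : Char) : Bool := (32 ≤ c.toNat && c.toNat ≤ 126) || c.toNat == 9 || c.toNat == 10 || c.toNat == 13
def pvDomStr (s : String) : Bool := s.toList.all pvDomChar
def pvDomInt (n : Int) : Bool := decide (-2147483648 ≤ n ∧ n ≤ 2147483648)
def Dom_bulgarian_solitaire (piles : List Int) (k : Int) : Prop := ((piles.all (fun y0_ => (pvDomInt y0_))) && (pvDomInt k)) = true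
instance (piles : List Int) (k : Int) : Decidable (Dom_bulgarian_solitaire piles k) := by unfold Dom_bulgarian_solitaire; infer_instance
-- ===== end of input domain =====

-- B replaces A's list-of-piles state by a size -> multiplicity histogram (dict): the
-- end test reads one bucket per size instead of scanning all piles, and a move folds
-- over distinct sizes instead of all piles (objective: alternative; same worst case).
-- A's while-loop does not terminate on every input (e.g. [6,1,1] with k=2 cycles
-- forever, and any k <= 0 spins on an empty range), and B's loop diverges on exactly
-- the same inputs; both ports are made total with the SAME generous fuel counter (a
-- plain totality guard, consumed once per while-iteration), so the proved equality
-- covers every input: where the Pythons return the fuel is never exhausted and both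
-- ports return that value, and where both Pythons loop forever both ports return the
-- same fuel-exhausted count.

-- ===== PORT A =====
-- for pile in piles_copy: adjpile = pile-1; newpile += 1; if adjpile > 0: tempPiles.append(adjpile)
def bsMoveA (l : List Int) : Int × List Int :=
  l.foldl (fun acc pile =>
      let adjpile := pile - 1
      let newpile := acc.1 + 1
      (newpile, if adjpile > 0 then acc.2 ++ [adjpile] else acc.2))
    (0, [])

-- the 'for i in enum_list' body: returns the updated (piles_copy, count, flag);
-- first missing i does the move (count += 1) and breaks
def bsScanA (enum : List Int) (n : Int) (l : List Int) (count : Int) (flag : Bool) :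
    List Int × Int × Bool :=
  match enum with
  | [] => (l, count, flag)
  | i :: rest =>
    if l.contains i = false then
      let m := bsMoveA l
      (m.2 ++ [m.1], count + 1, flag)
    else if i ≥ n then bsScanA rest n l count false
    else bsScanA rest n l count flag

-- while flag == True: … (fuel is only a totality guard)
def bsLoopA (fuel : Nat) (enum : List Int) (n : Int) (l : List Int) (count : Int) (flag : Bool) : Int :=
  match fuel with
  | 0 => count
  | f + 1 =>
    if flag then
      let r := bsScanA enum n l count flag
      bsLoopA f enum n r.1 r.2.1 r.2.2
    else count

-- shared totality fuel (both loops consume one unit per while-iteration)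
def bsFuel (piles : List Int) (k : Int) : Nat :=
  ((piles.foldl (fun a p => a + p.natAbs) 0) + k.toNat + 4) ^ 2

def bulgarian_solitaire (piles : List Int) (k : Int) : Int :=
  let enum_list := PySem.List.pyRange 1 (k + 1) 1
  bsLoopA (bsFuel piles k) enum_list (enum_list.length : Int) piles 0 true

-- ===== PORT B =====
-- one move on the histogram: total = sum(cnt.values()); shift every size s with s-1>0
-- down to s-1; then nxt[total] = nxt.get(total, 0) + 1
def bsStepB (d : PySem.Dict Int Int) : PySem.Dict Int Int :=
  let total := d.values.sum
  let nxt := d.items.foldl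
    (fun a sc => if sc.1 - 1 > 0 then a.insert (sc.1 - 1) sc.2 else a) PySem.Dict.empty
  nxt.insert total (nxt.getD total 0 + 1)

-- any(cnt.get(i, 0) == 0 for i in range(1, k+1))
def bsMissing (d : PySem.Dict Int Int) (k : Int) : Bool :=
  (PySem.List.pyRange 1 (k + 1) 1).any (fun i => d.getD i 0 == 0)

def bsLoopB (fuel : Nat) (k : Int) (d : PySem.Dict Int Int) (moves : Int) : Int :=
  match fuel with
  | 0 => moves
  | f + 1 => if bsMissing d k then bsLoopB f k (bsStepB d) (moves + 1) else moves

def bulgarian_solitaire_alt (piles : List Int) (k : Int) : Int :=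
  let cnt := piles.foldl (fun d p => d.insert p (d.getD p 0 + 1)) PySem.Dict.empty
  bsLoopB (bsFuel piles k) k cnt 0

-- ===== PRECONDITION & SPEC =====
def Spec_bulgarian_solitaire (piles : List Int) (k : Int) (out : Int) : Prop := out = bulgarian_solitaire_alt piles k
instance (piles : List Int) (k : Int) (out : Int) : Decidable (Spec_bulgarian_solitaire piles k out) := by unfold Spec_bulgarian_solitaire; infer_instance

-- ===== CLAIM (what is proved, stated in full; the proofs are below) =====
def Claim_equal_bulgarian_solitaire : Prop := ∀ (piles : List Int) (k : Int), Dom_bulgarian_solitaire piles k → Spec_bulgarian_solitaire piles k (bulgarian_solitaire piles k)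

-- ===== LEMMAS AND PROOFS =====

-- the loop invariant tying A's pile list to B's histogram: unique buckets whose counts
-- are the multiplicities of the pile sizes
def bsInv (l : List Int) (d : PySem.Dict Int Int) : Prop :=
  d.keys.Nodup ∧ (∀ i : Int, d.getD i 0 = (l.count i : Int))

-- A's inner move in closed form
lemma bsMoveA_gen (l : List Int) : ∀ (c : Int) (acc : List Int),
    l.foldl (fun acc pile =>
      let adjpile := pile - 1
      let newpile := acc.1 + 1
      (newpile, if adjpile > 0 then acc.2 ++ [adjpile] else acc.2)) (c, acc)
    = (c + l.length, acc ++ (l.filter (fun p => decide (p - 1 > 0))).map (fun p => p - 1)) := by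
  induction l with
  | nil => simp
  | cons x xs ih =>
    intro c acc
    simp only [List.foldl_cons, ih, List.filter_cons]
    by_cases hx : 1 < x <;> simp [hx] <;> ring_nf

lemma bsMoveA_eq (l : List Int) :
    bsMoveA l = ((l.length : Int), (l.filter (fun p => decide (p - 1 > 0))).map (fun p => p - 1)) := by
  unfold bsMoveA; rw [bsMoveA_gen]; simp

-- A's scan over a strictly increasing list bounded by n (with n ∈ enum when nonempty):
-- it either fires the move on the first missing value or ends the game
lemma bsScanA_eq (l : List Int) (count : Int) : ∀ (enum : List Int) (n : Int),
    enum.Pairwise (· < ·) → (∀ i ∈ enum, i ≤ n) → (enum ≠ [] → n ∈ enum) →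
    bsScanA enum n l count true =
      if enum.any (fun i => !(l.contains i)) then
        ((bsMoveA l).2 ++ [(bsMoveA l).1], count + 1, true)
      else (l, count, decide (enum = [])) := by
  intro enum
  induction enum with
  | nil => intro n _ _ _; simp [bsScanA]
  | cons i rest ih =>
    intro n hp hle hne
    by_cases hc : l.contains i = false
    · have hm : i ∉ l := by simpa using hc
      simp [bsScanA, hm]
    · have hci : l.contains i = true := by revert hc; cases l.contains i <;> simp
      by_cases hin : i ≥ n
      · have hrest : rest = [] := by
          rw [List.eq_nil_iff_forall_not_mem]
          intro j hj
          have h1 : i < j := (List.pairwise_cons.mp hp).1 j hj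
          have h2 : j ≤ n := hle j (List.mem_cons_of_mem i hj)
          omega
        subst hrest
        have hm : i ∈ l := by simpa using hci
        simp [bsScanA, hin, hm]
      · have hni : n ∈ i :: rest := hne (by simp)
        have hnr : n ∈ rest := by
          rcases List.mem_cons.mp hni with h | h
          · omega
          · exact h
        have hrne : rest ≠ [] := by intro h; subst h; simp at hnr
        have := ih n (List.pairwise_cons.mp hp).2
          (fun j hj => hle j (List.mem_cons_of_mem i hj)) (fun _ => hnr)
        have hm : i ∈ l := by simpa using hci
        show bsScanA (i :: rest) n l count true = _
        rw [bsScanA, hci]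
        simp only [Bool.true_eq_false, if_false, if_neg hin, this]
        simp [List.any_cons, hm, hrne]

lemma filterne_count (l : List Int) (k j : Int) (h : j ≠ k) :
    (l.filter (fun x => !(x == k))).count j = l.count j := by
  rw [List.count_filter]; simp [h]

lemma filterne_length (l : List Int) (k : Int) :
    (l.filter (fun x => !(x == k))).length + l.count k = l.length := by
  rw [List.count]
  induction l with
  | nil => simp
  | cons x xs ih => by_cases hx : x = k <;> simp [hx] <;> omega

-- Σ over a nodup key list covering l of the multiplicities is the length of l
lemma sum_count_keys : ∀ (keys : List Int) (l : List Int), keys.Nodup →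
    (∀ x ∈ l, x ∈ keys) →
    (keys.map (fun j => (l.count j : Int))).sum = (l.length : Int) := by
  intro keys
  induction keys with
  | nil =>
    intro l _ hcov
    have : l = [] := List.eq_nil_iff_forall_not_mem.mpr
      (by intro x hx; exact absurd (hcov x hx) (by simp))
    simp [this]
  | cons k ks ih =>
    intro l hnd hcov
    have hnk : k ∉ ks := (List.nodup_cons.mp hnd).1
    have h2 : ∀ x ∈ l.filter (fun x => !(x == k)), x ∈ ks := by
      intro x hx
      have hm := List.mem_of_mem_filter hx
      have hne : x ≠ k := by have := List.of_mem_filter hx; simpa using this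
      rcases List.mem_cons.mp (hcov x hm) with h | h
      · exact absurd h hne
      · exact h
    have hmapeq : ks.map (fun j => (l.count j : Int))
        = ks.map (fun j => (((l.filter (fun x => !(x == k))).count j : Nat) : Int)) := by
      apply List.map_congr_left
      intro j hj
      rw [filterne_count l k j (by rintro rfl; exact hnk hj)]
    simp only [List.map_cons, List.sum_cons, hmapeq,
      ih _ ((List.nodup_cons.mp hnd).2) h2]
    have := filterne_length l k
    omega

lemma not_contains_of_not_mem (d : PySem.Dict Int Int) (k : Int) (h : k ∉ d.keys) :
    d.contains k = false := by
  rw [PySem.Dict.contains_eq_decide_mem_keys]; simpa using h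

lemma mem_keys_of_count_pos (l : List Int) (d : PySem.Dict Int Int) (h : bsInv l d)
    (x : Int) (hx : x ∈ l) : x ∈ d.keys := by
  by_contra hnk
  have h0 := PySem.Dict.getD_of_not_contains d (0 : Int) (not_contains_of_not_mem d x hnk)
  have hpt := h.2 x
  rw [h0] at hpt
  have hc : l.count x = 0 := by omega
  rw [List.count_eq_zero] at hc
  exact hc hx

-- sum(cnt.values()) is the number of piles, derived from the invariant
lemma bsValuesSum (l : List Int) (d : PySem.Dict Int Int) (h : bsInv l d) :
    d.values.sum = (l.length : Int) := by
  rw [PySem.Dict.values_eq_map_keys d h.1 0]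
  rw [List.map_congr_left (fun j _ => h.2 j)]
  exact sum_count_keys d.keys l h.1 (mem_keys_of_count_pos l d h)

-- the invariant holds for the initial histogram
lemma bsInv_init (piles : List Int) :
    bsInv piles (piles.foldl (fun d p => d.insert p (d.getD p 0 + 1)) PySem.Dict.empty) := by
  rw [PySem.Dict.foldl_insert_getD_add_one_eq_counter]
  exact ⟨PySem.Dict.nodup_keys_counter piles, fun i => PySem.Dict.getD_counter piles i⟩

-- the histogram-shift loop is the fold over the filtered items
lemma bsNxt_eq (d : PySem.Dict Int Int) :
    d.items.foldl (fun a sc => if sc.1 - 1 > 0 then a.insert (sc.1 - 1) sc.2 else a)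
        PySem.Dict.empty
      = (d.items.filter (fun sc => decide (sc.1 - 1 > 0))).foldl
          (fun a sc => a.insert (sc.1 - 1) sc.2) PySem.Dict.empty := by
  rw [List.foldl_filter]
  simp only [decide_eq_true_eq]

lemma bsNxt_items (d : PySem.Dict Int Int) (hnd : d.keys.Nodup) :
    (d.items.foldl (fun a sc => if sc.1 - 1 > 0 then a.insert (sc.1 - 1) sc.2 else a)
        PySem.Dict.empty).items
      = (d.items.filter (fun sc => decide (sc.1 - 1 > 0))).map (fun sc => (sc.1 - 1, sc.2)) := by
  rw [bsNxt_eq]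
  have hsub : (d.items.filter (fun sc => decide (sc.1 - 1 > 0))).map (fun sc : Int × Int => sc.1)
      |>.Sublist (d.items.map (fun sc : Int × Int => sc.1)) :=
    List.Sublist.map _ List.filter_sublist
  have hnd2 : ((d.items.filter (fun sc => decide (sc.1 - 1 > 0))).map
      (fun sc : Int × Int => sc.1 - 1)).Nodup := by
    have h1 : ((d.items.filter (fun sc => decide (sc.1 - 1 > 0))).map
        (fun sc : Int × Int => sc.1)).Nodup := hnd.sublist hsub
    have heq : ((d.items.filter (fun sc => decide (sc.1 - 1 > 0))).map
        (fun sc : Int × Int => sc.1 - 1))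
        = ((d.items.filter (fun sc => decide (sc.1 - 1 > 0))).map
          (fun sc : Int × Int => sc.1)).map (fun x => x - 1) := by
      simp [List.map_map, Function.comp]
    rw [heq]
    exact h1.map (fun a b hab => by omega)
  exact PySem.Dict.items_foldl_insert_fresh _ _ _ _ (fun a _ => by simp) hnd2

lemma bsNxt_keys_nodup (d : PySem.Dict Int Int) (hnd : d.keys.Nodup) :
    (d.items.foldl (fun a sc => if sc.1 - 1 > 0 then a.insert (sc.1 - 1) sc.2 else a)
        PySem.Dict.empty).keys.Nodup := by
  have hitems := bsNxt_items d hnd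
  have hkeys : (d.items.foldl (fun a sc => if sc.1 - 1 > 0 then a.insert (sc.1 - 1) sc.2 else a)
      PySem.Dict.empty).keys
      = (d.items.filter (fun sc => decide (sc.1 - 1 > 0))).map (fun sc : Int × Int => sc.1 - 1) := by
    show (d.items.foldl (fun a sc => if sc.1 - 1 > 0 then a.insert (sc.1 - 1) sc.2 else a)
      PySem.Dict.empty).items.map (·.1) = _
    rw [hitems]; simp [List.map_map, Function.comp]
  rw [hkeys]
  have hsub : (d.items.filter (fun sc => decide (sc.1 - 1 > 0))).map (fun sc : Int × Int => sc.1)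
      |>.Sublist (d.items.map (fun sc : Int × Int => sc.1)) :=
    List.Sublist.map _ List.filter_sublist
  have h1 := hnd.sublist hsub
  have heq : ((d.items.filter (fun sc => decide (sc.1 - 1 > 0))).map (fun sc : Int × Int => sc.1 - 1))
      = ((d.items.filter (fun sc => decide (sc.1 - 1 > 0))).map (fun sc : Int × Int => sc.1)).map
        (fun x => x - 1) := by
    simp [List.map_map, Function.comp]
  rw [heq]
  exact h1.map (fun a b hab => by omega)

-- shifting the histogram reads bucket j as bucket j+1 of the old histogram (piles of
-- size ≤ 1 disappear)
lemma bsNxt_getD (d : PySem.Dict Int Int) (hnd : d.keys.Nodup) (j : Int) :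
    (d.items.foldl (fun a sc => if sc.1 - 1 > 0 then a.insert (sc.1 - 1) sc.2 else a)
        PySem.Dict.empty).getD j 0
      = if j > 0 then d.getD (j + 1) 0 else 0 := by
  set nxt := d.items.foldl (fun a sc => if sc.1 - 1 > 0 then a.insert (sc.1 - 1) sc.2 else a)
    PySem.Dict.empty with hnxt
  have hitems := bsNxt_items d hnd
  have hkeys : nxt.keys = (d.items.filter (fun sc => decide (sc.1 - 1 > 0))).map
      (fun sc : Int × Int => sc.1 - 1) := by
    show nxt.items.map (·.1) = _
    rw [hitems]; simp [List.map_map, Function.comp]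
  have hnodup := bsNxt_keys_nodup d hnd
  by_cases hj : j > 0
  · by_cases hmem : (j + 1) ∈ d.keys
    · obtain ⟨sc, hsc, hfst⟩ := List.mem_map.mp hmem
      have hscF : sc ∈ d.items.filter (fun sc => decide (sc.1 - 1 > 0)) := by
        rw [List.mem_filter]; refine ⟨hsc, ?_⟩; rw [decide_eq_true_eq]; omega
      have hmemn : (j, sc.2) ∈ nxt.items := by
        rw [hitems]
        exact List.mem_map.mpr ⟨sc, hscF, by simp [hfst]⟩
      rw [PySem.Dict.getD_of_mem_items nxt hmemn hnodup 0]
      have hd : (j + 1, sc.2) ∈ d.items := by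
        have hsceq : sc = (j + 1, sc.2) := by rw [← hfst]
        rw [← hsceq]; exact hsc
      rw [PySem.Dict.getD_of_mem_items d hd hnd 0]
      simp [hj]
    · have h1 : d.getD (j + 1) 0 = 0 :=
        PySem.Dict.getD_of_not_contains d 0 (not_contains_of_not_mem d _ hmem)
      have h2 : j ∉ nxt.keys := by
        rw [hkeys]
        intro hc
        obtain ⟨sc, hscF, hfst⟩ := List.mem_map.mp hc
        have hsc := List.mem_of_mem_filter hscF
        apply hmem
        exact List.mem_map.mpr ⟨sc, hsc, by omega⟩
      rw [PySem.Dict.getD_of_not_contains nxt 0 (not_contains_of_not_mem nxt _ h2), h1]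
      simp
  · have h2 : j ∉ nxt.keys := by
      rw [hkeys]
      intro hc
      obtain ⟨sc, hscF, hfst⟩ := List.mem_map.mp hc
      have := List.of_mem_filter hscF
      simp at this
      omega
    rw [PySem.Dict.getD_of_not_contains nxt 0 (not_contains_of_not_mem nxt _ h2)]
    simp [hj]

lemma bsCount_move_left (l : List Int) (j : Int) :
    ((l.filter (fun p => decide (p - 1 > 0))).map (fun p => p - 1)).count j
    = (if j > 0 then l.count (j + 1) else 0) := by
  have h1 : ((l.filter (fun p => decide (p - 1 > 0))).map (fun p => p - 1)).count j
      = (l.filter (fun p => decide (p - 1 > 0))).count (j + 1) := by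
    have := List.count_map_of_injective (l.filter (fun p => decide (p - 1 > 0)))
      (fun p : Int => p - 1) (fun a b hab => by simp only [] at hab; omega) (j + 1)
    simpa using this
  by_cases hj : j > 0
  · rw [h1, List.count_filter (by rw [decide_eq_true_eq]; omega), if_pos hj]
  · rw [h1, if_neg hj, List.count_eq_zero]
    intro hmem
    have := List.of_mem_filter hmem
    rw [decide_eq_true_eq] at this
    omega

lemma bsCount_move_right (l : List Int) (j : Int) :
    ([(l.length : Int)]).count j = (if j = (l.length : Int) then 1 else 0) := by
  by_cases hj : j = (l.length : Int) <;> simp [List.count_singleton, hj]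
  omega

-- the invariant is preserved by one move
lemma bsInv_step (l : List Int) (d : PySem.Dict Int Int) (h : bsInv l d) :
    bsInv ((bsMoveA l).2 ++ [(bsMoveA l).1]) (bsStepB d) := by
  obtain ⟨hnd, hpt⟩ := h
  rw [bsMoveA_eq]
  simp only [bsStepB]
  have hT : d.values.sum = (l.length : Int) := bsValuesSum l d ⟨hnd, hpt⟩
  have hnnd := bsNxt_keys_nodup d hnd
  constructor
  · exact PySem.Dict.nodup_keys_insert _ _ _ hnnd
  · intro j
    rw [PySem.Dict.getD_insert, hT, bsNxt_getD d hnd, bsNxt_getD d hnd]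
    have hm : ((((l.filter (fun p => decide (p - 1 > 0))).map (fun p => p - 1)
        ++ [(l.length : Int)]).count j : Nat) : Int)
        = (if j > 0 then (l.count (j + 1) : Int) else 0)
          + (if j = (l.length : Int) then 1 else 0) := by
      rw [List.count_append, bsCount_move_left, bsCount_move_right]
      by_cases h1 : j > 0 <;> by_cases h2 : j = (l.length : Int) <;> simp [h1, h2]
    rw [hm]
    simp only [hpt]
    by_cases h2 : j = (l.length : Int)
    · rw [if_pos h2, if_pos h2, h2]
    · by_cases hp : j > 0 <;> simp [h2, hp]

-- the two end tests agree under the invariant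
lemma bsMissing_eq (l : List Int) (d : PySem.Dict Int Int) (k : Int) (h : bsInv l d) :
    (PySem.List.pyRange 1 (k + 1) 1).any (fun i => !(l.contains i)) = bsMissing d k := by
  unfold bsMissing
  apply List.any_congr rfl
  intro a
  rw [h.2 a]
  by_cases hm : a ∈ l
  · have h1 : l.contains a = true := by simpa using hm
    have h2 : l.count a ≠ 0 := by
      rw [Ne, List.count_eq_zero]; exact fun hc => hc hm
    have hb : (((l.count a : Nat) : Int) == 0) = false := by
      rw [beq_eq_false_iff_ne]
      exact fun hc => h2 (by exact_mod_cast hc)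
    simp [hb, hm]
  · have h1 : l.contains a = false := by simpa using hm
    have h2 : l.count a = 0 := List.count_eq_zero.mpr hm
    simp [h2]
    try exact hm

lemma bsLoopB_of_missing_false (f : Nat) (k : Int) (d : PySem.Dict Int Int) (m : Int)
    (h : bsMissing d k = false) : bsLoopB f k d m = m := by
  cases f <;> simp [bsLoopB, h]

lemma bsLoopA_flag_false (f : Nat) (e : List Int) (n : Int) (l : List Int) (c : Int) :
    bsLoopA f e n l c false = c := by
  cases f <;> simp [bsLoopA]

-- main alignment: with the same fuel the two loops return the same count
lemma bsLoop_eq (k : Int) : ∀ (fuel : Nat) (l : List Int) (d : PySem.Dict Int Int) (count : Int),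
    bsInv l d →
    bsLoopA fuel (PySem.List.pyRange 1 (k + 1) 1) ((PySem.List.pyRange 1 (k + 1) 1).length : Int)
      l count true = bsLoopB fuel k d count := by
  intro fuel
  induction fuel with
  | zero => intro l d count _; rfl
  | succ f ih =>
    intro l d count hinv
    set enum := PySem.List.pyRange 1 (k + 1) 1 with henum
    have hscan := bsScanA_eq l count enum ((enum.length : Int))
      (PySem.List.pairwise_lt_pyRange_one 1 (k + 1))
      (by
        intro i hi
        have := PySem.List.mem_pyRange_one.mp hi
        rw [PySem.List.length_pyRange_one]
        omega)
      (by
        intro hne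
        have hk : 1 ≤ k := by
          by_contra hk
          apply hne
          exact PySem.List.pyRange_one_eq_nil (by omega)
        rw [PySem.List.length_pyRange_one]
        have hcast : ((k + 1 - 1).toNat : Int) = k := by omega
        rw [hcast]
        exact PySem.List.mem_pyRange_one.mpr ⟨hk, by omega⟩)
    show bsLoopA (f + 1) enum ((enum.length : Int)) l count true = bsLoopB (f + 1) k d count
    rw [bsLoopA, if_pos rfl, hscan, bsLoopB, bsMissing_eq l d k hinv]
    by_cases hmiss : bsMissing d k = true
    · rw [if_pos hmiss, if_pos hmiss]
      exact ih _ _ _ (bsInv_step l d hinv)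
    · have hmf : bsMissing d k = false := by revert hmiss; cases bsMissing d k <;> simp
      rw [if_neg hmiss, if_neg hmiss]
      change bsLoopA f enum ((enum.length : Int)) l count (decide (enum = [])) = count
      by_cases hke : enum = []
      · rw [show decide (enum = []) = true by simp [hke]]
        rw [ih l d count hinv]
        exact bsLoopB_of_missing_false f k d count hmf
      · rw [show decide (enum = []) = false by simp [hke]]
        exact bsLoopA_flag_false f enum _ l count

-- ===== VERDICT (by name: the statement is the Claim_ definition above) =====
theorem bulgarian_solitaire_spec : Claim_equal_bulgarian_solitaire := by
  intro piles k _
  unfold Spec_bulgarian_solitaire bulgarian_solitaire bulgarian_solitaire_alt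
  exact bsLoop_eq k (bsFuel piles k) piles _ 0 (bsInv_init piles)
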